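-- pv_equiv track=rewrite | github.com/michael-griffiths-aon/AoC24 | d5p2/d5p2.py | d5p2
-- ===== SOURCE A (Python) =====
-- def d5p2(rules, reports):
--     sum = 0
--     reordered_reports = []
--     for report in reports:
--         pertinent_rules = []
--         check = True
--         for rule in rules:
--             if check_rule(report, rule):
--                 check = False
--         if check:
--             continue
--         else:
--             reordered_reports.append(reorder_report(report, rules))
--
--     for report in reordered_reports:
--         midpoint = int(len(report) / 2)
--         sum += report[midpoint]
--
--     return sum
--
-- def check_rule(report, rule):
--     for i in range(len(report)):
--         if report[i] == rule[1]:
--             if rule[0] in report[list(report).index(report[i]):]: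
--                 return True
--
--     return False
--
-- def reorder_report(report, rules):
--     unchanged = False
--     while unchanged == False:
--         report_copy = report.copy()
--         for rule in rules:
--             if rule[0] in report_copy and rule[1] in report_copy:
--                 index_0 = report_copy.index(rule[0])
--                 index_1 = report_copy.index(rule[1])
--                 if index_0 > index_1:
--                     report_copy[index_0], report_copy[index_1] = report_copy[index_1], report_copy[index_0]
--         if report == report_copy:
--             unchanged = True
--         report = report_copy
--
--     return report
-- ===== SOURCE B (Python) =====
-- def d5p2(rules, reports):
--     # One pass per report: detect a rule violation via first-occurrence indices,
--     # then place pages by predecessor count (rank) instead of iterating swap passes.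
--     rule_set = set(rules)
--     total = 0
--     for report in reports:
--         violated = any(r1 in report and r0 in report[report.index(r1):]
--                        for (r0, r1) in rule_set)
--         if violated:
--             ordered = sorted(report,
--                              key=lambda x: sum(1 for y in report if (y, x) in rule_set))
--             total += ordered[len(ordered) // 2]
--     return total
-- ===== Notes on version B (the rewrite author's own statement) =====
-- stated objective: alternative
-- what changed: Replaces A's repeated swap-until-fixpoint passes over the whole rule list with a single rank computation (each page's count of rule-predecessors among the report's pages, looked up in a set) used as a sort key, and detects violations directly from first-occurrence indices instead of scanning every position.
-- outside the precondition, e.g. on d5p2([(5, 6), (6, 5), (4, 5)], [[6, 4, 5]]): A returns 4, B returns 6; on d5p2([(3, 1), (1, 3)], [[1, 3]]): A returns 3, B returns 3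
import Mathlib
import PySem

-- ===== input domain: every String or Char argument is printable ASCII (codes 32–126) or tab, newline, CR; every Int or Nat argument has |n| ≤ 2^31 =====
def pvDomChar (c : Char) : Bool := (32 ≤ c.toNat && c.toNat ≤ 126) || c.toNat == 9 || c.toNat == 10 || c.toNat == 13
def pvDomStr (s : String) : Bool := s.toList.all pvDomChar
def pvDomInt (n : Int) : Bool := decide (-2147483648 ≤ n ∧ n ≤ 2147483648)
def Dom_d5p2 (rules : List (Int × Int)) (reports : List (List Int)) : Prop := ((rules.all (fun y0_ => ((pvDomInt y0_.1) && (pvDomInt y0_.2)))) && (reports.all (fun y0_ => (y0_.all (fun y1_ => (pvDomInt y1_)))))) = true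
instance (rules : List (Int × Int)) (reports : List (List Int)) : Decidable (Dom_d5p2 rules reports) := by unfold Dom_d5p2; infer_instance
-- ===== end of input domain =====

-- B ranks each page by its number of rule-predecessors in the report and sorts by that key,
-- replacing A's repeated swap-until-fixpoint passes (objective: alternative algorithm; equal on Pre_).


-- ===== PORT A =====
-- check_rule: 'list(report).index(report[i])' is PySem.List.index?; it is some because report[i] ∈ report,
-- so the .getD 0 default is never taken; 'x in l' is List.contains.
def checkRule (report : List Int) (rule : Int × Int) : Bool :=
  (List.range report.length).any fun i =>
    report.getD i 0 == rule.2 &&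
      (report.drop ((PySem.List.index? report (report.getD i 0)).getD 0)).contains rule.1

-- one 'for rule in rules' body of reorder_report: tuple swap assigns index_0 first, then index_1,
-- from the old values; list.index on members is some, so .getD 0 is never the default.
def swapStep (rc : List Int) (rule : Int × Int) : List Int :=
  if rc.contains rule.1 && rc.contains rule.2 then
    let i0 := (PySem.List.index? rc rule.1).getD 0
    let i1 := (PySem.List.index? rc rule.2).getD 0
    if i1 < i0 then (rc.set i0 (rc.getD i1 0)).set i1 (rc.getD i0 0) else rc
  else rc

def passRules (rules : List (Int × Int)) (rc : List Int) : List Int := rules.foldl swapStep rc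

-- the 'while unchanged == False' loop, run on fuel report.length² + 1: under Pre_ the pass loop
-- reaches its fixpoint in at most inversion-count < fuel passes (proved below); outside Pre_
-- Python may loop forever, and those inputs are excluded by Pre_.
def reorderReport (rules : List (Int × Int)) : Nat → List Int → List Int
  | 0, report => report
  | fuel + 1, report =>
      let rc := passRules rules report
      if rc = report then report else reorderReport rules fuel rc

-- int(len(report)/2) = len // 2 for len ≥ 0; report[mid] is in range because every reordered
-- report is nonempty (a violated rule needs a member), so .getD never takes its default.
def d5p2 (rules : List (Int × Int)) (reports : List (List Int)) : Int :=
  let reordered := reports.foldl (fun acc report =>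
      let check := rules.foldl (fun ch rule => if checkRule report rule then false else ch) true
      if check then acc
      else acc ++ [reorderReport rules (report.length * report.length + 1) report]) []
  reordered.foldl (fun s report => s + report.getD (report.length / 2) 0) 0

-- ===== PORT B =====
-- 'r1 in report and r0 in report[report.index(r1):]': index only evaluated when r1 is present.
def violB (ruleSet : PySem.Set (Int × Int)) (report : List Int) : Bool :=
  ruleSet.any fun r =>
    report.contains r.2 &&
      (match PySem.List.index? report r.2 with
       | some k => (report.drop k).contains r.1
       | none => false)

-- sorted(report, key = predecessor count); ordered[len//2] is in range since a violated
-- report is nonempty, so .getD never takes its default.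
def d5p2_alt (rules : List (Int × Int)) (reports : List (List Int)) : Int :=
  let ruleSet : PySem.Set (Int × Int) := PySem.Set.ofList rules
  reports.foldl (fun total report =>
    if violB ruleSet report then
      let ordered := PySem.List.sorted report
        (fun x => ((report.countP (fun y => PySem.Set.contains ruleSet (y, x))) : Int)) false
      total + ordered.getD (ordered.length / 2) 0
    else total) 0

-- ===== PRECONDITION & SPEC =====
-- report violates some rule (exactly A's check: some occurrence of r.2 with r.1 at or after its first occurrence)
def Viol (rules : List (Int × Int)) (report : List Int) : Prop :=
  ∃ r ∈ rules, r.2 ∈ report ∧ r.1 ∈ report.drop (report.idxOf r.2)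

-- the rules restricted to the report's pages form a strict total order
def STO (rules : List (Int × Int)) (report : List Int) : Prop :=
  (∀ x ∈ report, (x, x) ∉ rules) ∧
  (∀ x ∈ report, ∀ y ∈ report, x ≠ y → ((x, y) ∈ rules ↔ (y, x) ∉ rules)) ∧
  (∀ x ∈ report, ∀ y ∈ report, ∀ z ∈ report,
     (x, y) ∈ rules → (y, z) ∈ rules → (x, z) ∈ rules)

-- Pre_ excludes inputs where some rule-violating report has duplicate pages or where the rules do
-- not restrict to a strict total order on that report's pages: there A's first-occurrence swap
-- loop may not terminate, and when it does its result is an accident of the rule list's order.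
def Pre_d5p2 (rules : List (Int × Int)) (reports : List (List Int)) : Prop :=
  ∀ report ∈ reports, Viol rules report → report.Nodup ∧ STO rules report

instance (rules : List (Int × Int)) (reports : List (List Int)) : Decidable (Pre_d5p2 rules reports) := by
  unfold Pre_d5p2 Viol STO; infer_instance

def pvWitness_d5p2 : (List (Int × Int)) × List (List Int) :=
  ([(1, 2), (2, 3), (1, 3)], [[2, 1, 3], [1, 2, 3]])

def Spec_d5p2 (rules : List (Int × Int)) (reports : List (List Int)) (out : Int) : Prop := out = d5p2_alt rules reports
instance (rules : List (Int × Int)) (reports : List (List Int)) (out : Int) : Decidable (Spec_d5p2 rules reports out) := by unfold Spec_d5p2; infer_instance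

-- ===== CLAIM (what is proved, stated in full; the proofs are below) =====
def Claim_equal_d5p2 : Prop := ∀ (rules : List (Int × Int)) (reports : List (List Int)), Dom_d5p2 rules reports → Pre_d5p2 rules reports → Spec_d5p2 rules reports (d5p2 rules reports)

-- ===== LEMMAS AND PROOFS =====

-- number of inverted pairs of rc w.r.t. the rules: pairs (p < q) with (rc[q], rc[p]) ∈ rules
def invN (rules : List (Int × Int)) : List Int → Nat
  | [] => 0
  | x :: xs => xs.countP (fun y => (rules.contains (y, x))) + invN rules xs

theorem invN_le_sq (rules : List (Int × Int)) (l : List Int) :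
    invN rules l ≤ l.length * l.length := by
  induction l with
  | nil => simp [invN]
  | cons a t ih =>
      have h1 : t.countP (fun y => rules.contains (y, a)) ≤ t.length := List.countP_le_length
      have : (t.length + 1) * (t.length + 1) = t.length * t.length + 2 * t.length + 1 := by ring
      simp only [invN, List.length_cons]
      omega

theorem index?_getD_eq_idxOf (l : List Int) (v : Int) (h : v ∈ l) :
    (PySem.List.index? l v).getD 0 = l.idxOf v := by
  rw [PySem.List.index?_eq_idxOf?, List.idxOf_eq_getD_idxOf?]
  cases hi : List.idxOf? v l with
  | none => exact absurd h (by simpa using (List.idxOf?_eq_none_iff.mp hi))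
  | some k => simp

-- pointwise comparison of an element of the middle segment, from the strict total order
theorem pointwise_le (rules : List (Int × Int)) (report : List Int)
    (hsto : STO rules report)
    (a b z : Int) (ha : a ∈ report) (hb : b ∈ report) (hz : z ∈ report) (hab : (a, b) ∈ rules) :
    ((if rules.contains (z, a) then 1 else 0) + (if rules.contains (b, z) then 1 else 0) : Nat) ≤
    (if rules.contains (z, b) then 1 else 0) + (if rules.contains (a, z) then 1 else 0) := by
  obtain ⟨hirr, htot, htrans⟩ := hsto
  have hba : (b, a) ∉ rules := by
    by_cases hzab : a = b
    · subst hzab; exact hirr a ha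
    · exact ((htot a ha b hb hzab).mp hab)
  simp only [List.contains_iff_mem]
  by_cases h1 : (z, a) ∈ rules
  · have hzb : (z, b) ∈ rules := htrans z hz a ha b hb h1 hab
    have hbz : (b, z) ∉ rules := fun hbz => hba (htrans b hb z hz a ha hbz h1)
    simp [h1, hzb, hbz]
  · by_cases h2 : (b, z) ∈ rules
    · have haz : (a, z) ∈ rules := htrans a ha b hb z hz hab h2
      simp [h1, h2, haz]
    · simp [h1, h2]

-- core of the swap: with a before-b rule, moving a ahead of b strictly lowers invN
theorem invN_swap_core_lt (rules : List (Int × Int)) (report : List Int)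
    (hsto : STO rules report)
    (m v : List Int) (a b : Int)
    (hm : ∀ z ∈ m, z ∈ report) (ha : a ∈ report) (hb : b ∈ report)
    (hab : (a, b) ∈ rules) :
    invN rules (a :: (m ++ (b :: v))) < invN rules (b :: (m ++ (a :: v))) := by
  have hba : (b, a) ∉ rules := by
    by_cases hzab : a = b
    · subst hzab; exact hsto.1 a ha
    · exact ((hsto.2.1 a ha b hb hzab).mp hab)
  induction m with
  | nil =>
      simp only [invN, List.nil_append, List.countP_cons, List.contains_iff_mem,
        ]
      simp [hab, hba]
      omega
  | cons z m' ih =>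
      have hz : z ∈ report := hm z (by simp)
      have hpt := pointwise_le rules report hsto a b z ha hb hz hab
      have ih' := ih (fun w hw => hm w (by simp [hw]))
      simp only [invN, List.cons_append, List.countP_cons, List.countP_append] at *
      omega

theorem swap_perm (u m v : List Int) (x y : Int) :
    (u ++ (x :: (m ++ (y :: v)))).Perm (u ++ (y :: (m ++ (x :: v)))) := by
  refine List.Perm.append_left u ?_
  exact ((List.Perm.cons x List.perm_middle).trans
    ((List.Perm.swap y x (m ++ v)).trans (List.Perm.cons y List.perm_middle.symm)))

theorem invN_append (rules : List (Int × Int)) (l₁ l₂ : List Int) :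
    invN rules (l₁ ++ l₂) = invN rules l₁ + invN rules l₂ +
      (l₁.map (fun x => l₂.countP (fun y => rules.contains (y, x)))).sum := by
  induction l₁ with
  | nil => simp [invN]
  | cons a t ih => simp [invN, ih, List.countP_append]; ring

theorem invN_swap_lt (rules : List (Int × Int)) (report : List Int)
    (hsto : STO rules report)
    (u m v : List Int) (a b : Int)
    (hmem : ∀ z ∈ u ++ (b :: (m ++ (a :: v))), z ∈ report)
    (hab : (a, b) ∈ rules) :
    invN rules (u ++ (a :: (m ++ (b :: v)))) < invN rules (u ++ (b :: (m ++ (a :: v)))) := by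
  have hcore : invN rules (a :: (m ++ (b :: v))) < invN rules (b :: (m ++ (a :: v))) :=
    invN_swap_core_lt rules report hsto m v a b
      (fun z hzm => hmem z (by simp [hzm])) (hmem a (by simp)) (hmem b (by simp)) hab
  have hperm : (a :: (m ++ (b :: v))).Perm (b :: (m ++ (a :: v))) := swap_perm [] m v a b
  have hcross : ∀ x : Int,
      (a :: (m ++ (b :: v))).countP (fun y => rules.contains (y, x)) =
      (b :: (m ++ (a :: v))).countP (fun y => rules.contains (y, x)) :=
    fun x => hperm.countP_congr (fun y _ => rfl)
  rw [invN_append rules u (a :: (m ++ (b :: v))), invN_append rules u (b :: (m ++ (a :: v)))]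
  have hmapeq : (u.map (fun x => (a :: (m ++ (b :: v))).countP (fun y => rules.contains (y, x)))).sum =
      (u.map (fun x => (b :: (m ++ (a :: v))).countP (fun y => rules.contains (y, x)))).sum := by
    congr 1
    exact List.map_congr_left (fun x _ => hcross x)
  omega

-- == swapStep analysis ==
def SwapCond (rc : List Int) (rule : Int × Int) : Prop :=
  rule.1 ∈ rc ∧ rule.2 ∈ rc ∧ rc.idxOf rule.2 < rc.idxOf rule.1

theorem set_mid (u v : List Int) (x y : Int) : (u ++ x :: v).set u.length y = u ++ y :: v := by
  simp

theorem swapStep_eq_of_not (rc : List Int) (rule : Int × Int) (h : ¬ SwapCond rc rule) :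
    swapStep rc rule = rc := by
  by_cases h1 : rule.1 ∈ rc
  · by_cases h2 : rule.2 ∈ rc
    · have hnlt : ¬ (rc.idxOf rule.2 < rc.idxOf rule.1) := fun hlt => h ⟨h1, h2, hlt⟩
      unfold swapStep
      rw [if_pos (by simp [List.contains_iff_mem, h1, h2]),
        index?_getD_eq_idxOf rc rule.1 h1, index?_getD_eq_idxOf rc rule.2 h2, if_neg hnlt]
    · unfold swapStep
      rw [if_neg (by simp [List.contains_iff_mem, h2])]
  · unfold swapStep
    rw [if_neg (by simp [List.contains_iff_mem, h1])]

theorem split_two (l : List Int) (i1 i0 : Nat) (hlt : i1 < i0) (h0 : i0 < l.length) :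
    ∃ u m v, l = u ++ (l[i1]'(by omega) :: (m ++ (l[i0]'h0 :: v))) ∧
      u.length = i1 ∧ u.length + m.length + 1 = i0 := by
  have h1 : i1 < l.length := by omega
  have hdroplen : (l.drop (i1 + 1)).length = l.length - (i1 + 1) := by
    simp
  have hdlen : i0 - i1 - 1 < (l.drop (i1 + 1)).length := by rw [hdroplen]; omega
  refine ⟨l.take i1, (l.drop (i1 + 1)).take (i0 - i1 - 1), l.drop (i0 + 1), ?_, ?_, ?_⟩
  · have e3a : (l.drop (i1 + 1)).drop (i0 - i1 - 1) = l.drop i0 := by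
      rw [List.drop_drop]
      congr 1
      omega
    have e3 : (l.drop (i1 + 1)).drop (i0 - i1 - 1) = (l[i0]'h0) :: l.drop (i0 + 1) := by
      rw [e3a, List.getElem_cons_drop h0]
    have e2 : l.drop (i1 + 1) =
        (l.drop (i1 + 1)).take (i0 - i1 - 1) ++ (l.drop (i1 + 1)).drop (i0 - i1 - 1) :=
      (List.take_append_drop _ _).symm
    rw [e3] at e2
    have e4 : l = l.take i1 ++ ((l[i1]'h1) :: l.drop (i1 + 1)) := by
      rw [List.getElem_cons_drop, List.take_append_drop]
    conv_lhs => rw [e4, e2]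
  · rw [List.length_take]; omega
  · rw [List.length_take, List.length_take, hdroplen]; omega

theorem set_swap_of_split (u m v : List Int) (x y c d : Int) :
    ((u ++ (x :: (m ++ (y :: v)))).set (u.length + m.length + 1) c).set u.length d =
      u ++ (d :: (m ++ (c :: v))) := by
  have e1 : u ++ (x :: (m ++ (y :: v))) = (u ++ x :: m) ++ (y :: v) := by simp
  have e2 : (u ++ x :: m).length = u.length + m.length + 1 := by simp; omega
  rw [e1, ← e2, set_mid]
  have e3 : (u ++ x :: m) ++ (c :: v) = u ++ (x :: (m ++ (c :: v))) := by simp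
  rw [e3, set_mid]

theorem swapStep_decomp (rc : List Int) (rule : Int × Int) (h : SwapCond rc rule) :
    ∃ u m v, rc = u ++ (rule.2 :: (m ++ (rule.1 :: v))) ∧
      swapStep rc rule = u ++ (rule.1 :: (m ++ (rule.2 :: v))) := by
  obtain ⟨h1, h2, hlt⟩ := h
  have hi0 : rc.idxOf rule.1 < rc.length := List.idxOf_lt_length_of_mem h1
  have hi1 : rc.idxOf rule.2 < rc.length := List.idxOf_lt_length_of_mem h2
  obtain ⟨u, m, v, hsplit, hlen1, hlen0⟩ := split_two rc (rc.idxOf rule.2) (rc.idxOf rule.1) hlt hi0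
  rw [List.getElem_idxOf hi1, List.getElem_idxOf hi0] at hsplit
  refine ⟨u, m, v, hsplit, ?_⟩
  have hcond : swapStep rc rule =
      (rc.set (rc.idxOf rule.1) (rc.getD (rc.idxOf rule.2) 0)).set (rc.idxOf rule.2) (rc.getD (rc.idxOf rule.1) 0) := by
    unfold swapStep
    rw [if_pos (by simp [List.contains_iff_mem, h1, h2]),
      index?_getD_eq_idxOf rc rule.1 h1, index?_getD_eq_idxOf rc rule.2 h2, if_pos hlt]
  rw [hcond, List.getD_eq_getElem rc 0 hi1, List.getD_eq_getElem rc 0 hi0,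
    List.getElem_idxOf hi1, List.getElem_idxOf hi0,
    show rc.idxOf rule.1 = u.length + m.length + 1 from hlen0.symm,
    show rc.idxOf rule.2 = u.length from hlen1.symm, hsplit]
  exact set_swap_of_split u m v rule.2 rule.1 rule.2 rule.1

theorem swapStep_perm (rc : List Int) (rule : Int × Int) : (swapStep rc rule).Perm rc := by
  by_cases h : SwapCond rc rule
  · obtain ⟨u, m, v, hrc, hsw⟩ := swapStep_decomp rc rule h
    rw [hsw]
    conv_rhs => rw [hrc]
    exact swap_perm u m v rule.1 rule.2
  · rw [swapStep_eq_of_not rc rule h]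

theorem swapStep_lt (rules : List (Int × Int)) (report rc : List Int) (rule : Int × Int)
    (hsto : STO rules report) (hmem : ∀ z ∈ rc, z ∈ report) (hr : rule ∈ rules)
    (h : SwapCond rc rule) :
    invN rules (swapStep rc rule) < invN rules rc := by
  obtain ⟨u, m, v, hrc, hsw⟩ := swapStep_decomp rc rule h
  rw [hsw]
  conv_rhs => rw [hrc]
  refine invN_swap_lt rules report hsto u m v rule.1 rule.2 ?_ (by simpa using hr)
  intro z hz
  exact hmem z (by rw [hrc]; exact hz)

-- == the pass over the rule list ==
theorem foldl_swap_perm (rs : List (Int × Int)) (rc : List Int) :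
    (rs.foldl swapStep rc).Perm rc := by
  induction rs generalizing rc with
  | nil => exact List.Perm.refl rc
  | cons r rs' ih => exact (ih (swapStep rc r)).trans (swapStep_perm rc r)

theorem foldl_swap_cases (rules : List (Int × Int)) (report : List Int) (hsto : STO rules report) :
    ∀ rs : List (Int × Int), (∀ r ∈ rs, r ∈ rules) → ∀ rc : List Int, (∀ z ∈ rc, z ∈ report) →
      (rs.foldl swapStep rc = rc ∧ ∀ r ∈ rs, ¬ SwapCond rc r) ∨
        invN rules (rs.foldl swapStep rc) < invN rules rc := by
  intro rs
  induction rs with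
  | nil => intro _ rc _; exact Or.inl ⟨rfl, by simp⟩
  | cons r rs' ih =>
      intro hrs rc hmem
      by_cases hc : SwapCond rc r
      · have hlt : invN rules (swapStep rc r) < invN rules rc :=
          swapStep_lt rules report rc r hsto hmem (hrs r (by simp)) hc
        have hmem' : ∀ z ∈ swapStep rc r, z ∈ report :=
          fun z hz => hmem z ((swapStep_perm rc r).mem_iff.mp hz)
        rcases ih (fun r' hr' => hrs r' (by simp [hr'])) (swapStep rc r) hmem' with ⟨heq, _⟩ | hlt2
        · exact Or.inr (by rw [List.foldl_cons, heq]; exact hlt)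
        · exact Or.inr (lt_trans (by simpa using hlt2) hlt)
      · have he : swapStep rc r = rc := swapStep_eq_of_not rc r hc
        rcases ih (fun r' hr' => hrs r' (by simp [hr'])) rc hmem with ⟨heq, hall⟩ | hlt2
        · refine Or.inl ⟨by rw [List.foldl_cons, he, heq], ?_⟩
          intro r' hr'
          rcases List.mem_cons.mp hr' with h | h
          · rw [h]; exact hc
          · exact hall r' h
        · exact Or.inr (by rw [List.foldl_cons, he]; exact hlt2)

-- == the fuelled while loop reaches a fixpoint ==
theorem reorder_fix (rules : List (Int × Int)) (report : List Int) (hsto : STO rules report) :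
    ∀ fuel : Nat, ∀ rc : List Int, invN rules rc < fuel → (∀ z ∈ rc, z ∈ report) →
      passRules rules (reorderReport rules fuel rc) = reorderReport rules fuel rc ∧
        (reorderReport rules fuel rc).Perm rc := by
  intro fuel
  induction fuel with
  | zero => intro rc h _; omega
  | succ n ih =>
      intro rc hfuel hmem
      by_cases h : passRules rules rc = rc
      · rw [reorderReport, if_pos h]
        exact ⟨h, List.Perm.refl rc⟩
      · rw [reorderReport, if_neg h]
        have hlt : invN rules (passRules rules rc) < invN rules rc := by
          rcases foldl_swap_cases rules report hsto rules (fun _ hr => hr) rc hmem with ⟨heq, _⟩ | hlt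
          · exact absurd heq h
          · exact hlt
        have hmem' : ∀ z ∈ passRules rules rc, z ∈ report :=
          fun z hz => hmem z ((foldl_swap_perm rules rc).mem_iff.mp hz)
        obtain ⟨hfix, hperm⟩ := ih (passRules rules rc) (by omega) hmem'
        exact ⟨hfix, hperm.trans (foldl_swap_perm rules rc)⟩

-- == a fixpoint of the pass is sorted by the rule relation ==
theorem fix_pairwise (rules : List (Int × Int)) (report rc : List Int)
    (hnd : rc.Nodup) (hsto : STO rules report) (hmem : ∀ z ∈ rc, z ∈ report)
    (hfix : passRules rules rc = rc) :
    rc.Pairwise (fun x y => (x, y) ∈ rules) := by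
  have hnc : ∀ r ∈ rules, ¬ SwapCond rc r := by
    rcases foldl_swap_cases rules report hsto rules (fun _ hr => hr) rc hmem with ⟨_, hall⟩ | hlt
    · exact hall
    · rw [show List.foldl swapStep rc rules = rc from hfix] at hlt; omega
  rw [List.pairwise_iff_getElem]
  intro i j hi hj hij
  have hxm : rc[i] ∈ rc := List.getElem_mem hi
  have hym : rc[j] ∈ rc := List.getElem_mem hj
  have hne : rc[i] ≠ rc[j] := by
    intro he
    have := (List.Nodup.getElem_inj_iff hnd).mp he
    omega
  by_cases hxy : (rc[i], rc[j]) ∈ rules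
  · exact hxy
  · exfalso
    have hyx : (rc[j], rc[i]) ∈ rules := by
      have := (hsto.2.1 rc[i] (hmem _ hxm) rc[j] (hmem _ hym) hne)
      by_cases hyx : (rc[j], rc[i]) ∈ rules
      · exact hyx
      · exact absurd (this.mpr hyx) hxy
    refine hnc (rc[j], rc[i]) hyx ⟨hym, hxm, ?_⟩
    simp only
    rw [List.Nodup.idxOf_getElem hnd i hi, List.Nodup.idxOf_getElem hnd j hj]
    omega

-- == ranks: B's sort key is strictly monotone along the rule relation ==
theorem setContains_iff (rules : List (Int × Int)) (p : Int × Int) :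
    PySem.Set.contains (PySem.Set.ofList rules) p = true ↔ p ∈ rules := by
  rw [PySem.Set.contains, List.contains_iff_mem]
  exact PySem.Set.mem_ofList rules p

theorem countP_or_disjoint (l : List Int) (p : Int → Bool) (a : Int) (hpa : p a = false) :
    l.countP (fun y => p y || y == a) = l.countP p + l.count a := by
  induction l with
  | nil => simp
  | cons z t ih =>
      by_cases hz : z = a
      · subst hz
        simp [List.countP_cons, List.count_cons, hpa, ih]
        omega
      · simp [List.countP_cons, List.count_cons, hz, ih]
        by_cases hp : p z <;> simp [hp] <;> omega

theorem rank_lt (rules : List (Int × Int)) (report : List Int) (hsto : STO rules report)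
    (a b : Int) (ha : a ∈ report) (hb : b ∈ report) (hab : (a, b) ∈ rules) :
    ((report.countP (fun y => PySem.Set.contains (PySem.Set.ofList rules) (y, a)) : Nat) : Int) <
    ((report.countP (fun y => PySem.Set.contains (PySem.Set.ofList rules) (y, b)) : Nat) : Int) := by
  have hpaa : PySem.Set.contains (PySem.Set.ofList rules) (a, a) = false := by
    rw [← Bool.not_eq_true]
    intro hc
    exact hsto.1 a ha ((setContains_iff rules (a, a)).mp hc)
  have hsplit : report.countP (fun y => PySem.Set.contains (PySem.Set.ofList rules) (y, a) || y == a) =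
      report.countP (fun y => PySem.Set.contains (PySem.Set.ofList rules) (y, a)) + report.count a :=
    countP_or_disjoint report (fun y => PySem.Set.contains (PySem.Set.ofList rules) (y, a)) a hpaa
  have hcount : 1 ≤ report.count a := List.count_pos_iff.mpr ha
  have hmono : report.countP (fun y => PySem.Set.contains (PySem.Set.ofList rules) (y, a) || y == a) ≤
      report.countP (fun y => PySem.Set.contains (PySem.Set.ofList rules) (y, b)) := by
    refine List.countP_mono_left ?_
    intro y hy hcond
    rcases Bool.or_eq_true_iff.mp hcond with hc | he
    · exact (setContains_iff rules (y, b)).mpr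
        (hsto.2.2 y hy a ha b hb ((setContains_iff rules (y, a)).mp hc) hab)
    · have : y = a := by simpa using he
      subst this
      exact (setContains_iff rules (y, b)).mpr hab
  omega

-- == per-report equality: A's fixpoint is exactly B's rank sort ==
theorem reorder_eq_sorted (rules : List (Int × Int)) (report : List Int)
    (hnd : report.Nodup) (hsto : STO rules report) :
    reorderReport rules (report.length * report.length + 1) report =
      PySem.List.sorted report
        (fun x => ((report.countP (fun y => PySem.Set.contains (PySem.Set.ofList rules) (y, x)) : Nat) : Int)) false := by
  obtain ⟨hfix, hperm⟩ := reorder_fix rules report hsto (report.length * report.length + 1) report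
    (by have := invN_le_sq rules report; omega) (fun z hz => hz)
  have hndL : (reorderReport rules (report.length * report.length + 1) report).Nodup :=
    hperm.nodup_iff.mpr hnd
  have hmemL : ∀ z ∈ reorderReport rules (report.length * report.length + 1) report, z ∈ report :=
    fun z hz => hperm.mem_iff.mp hz
  have hpw := fix_pairwise rules report _ hndL hsto hmemL hfix
  have hrank : (reorderReport rules (report.length * report.length + 1) report).Pairwise
      (fun a b => ((report.countP (fun y => PySem.Set.contains (PySem.Set.ofList rules) (y, a)) : Nat) : Int) <
        ((report.countP (fun y => PySem.Set.contains (PySem.Set.ofList rules) (y, b)) : Nat) : Int)) := by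
    refine List.Pairwise.imp_of_mem ?_ hpw
    intro a b hamem hbmem hab
    exact rank_lt rules report hsto a b (hmemL a hamem) (hmemL b hbmem) hab
  exact (PySem.List.sorted_eq_of_perm_of_pairwise_lt report _ _ hperm hrank).symm

-- == A's violation check agrees with B's ==
theorem checkRule_iff (report : List Int) (r : Int × Int) :
    checkRule report r = true ↔ r.2 ∈ report ∧ r.1 ∈ report.drop (report.idxOf r.2) := by
  unfold checkRule
  rw [List.any_eq_true]
  constructor
  · rintro ⟨i, hi, hcond⟩
    rw [List.mem_range] at hi
    rw [Bool.and_eq_true, beq_iff_eq] at hcond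
    obtain ⟨hv, hdrop⟩ := hcond
    rw [List.getD_eq_getElem report 0 hi] at hv hdrop
    have hmem : r.2 ∈ report := hv ▸ List.getElem_mem hi
    refine ⟨hmem, ?_⟩
    rw [index?_getD_eq_idxOf report _ (List.getElem_mem hi), hv] at hdrop
    exact List.contains_iff_mem.mp hdrop
  · rintro ⟨hmem, hdrop⟩
    have hi : report.idxOf r.2 < report.length := List.idxOf_lt_length_of_mem hmem
    refine ⟨report.idxOf r.2, List.mem_range.mpr hi, ?_⟩
    rw [Bool.and_eq_true, beq_iff_eq, List.getD_eq_getElem report 0 hi, List.getElem_idxOf hi]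
    refine ⟨rfl, ?_⟩
    rw [index?_getD_eq_idxOf report r.2 hmem]
    exact List.contains_iff_mem.mpr hdrop

theorem violB_iff (rules : List (Int × Int)) (report : List Int) :
    violB (PySem.Set.ofList rules) report = true ↔ Viol rules report := by
  unfold violB Viol
  rw [List.any_eq_true]
  constructor
  · rintro ⟨r, hr, hcond⟩
    have hrr : r ∈ rules := (PySem.Set.mem_ofList rules r).mp hr
    rw [Bool.and_eq_true] at hcond
    obtain ⟨hmem, hdrop⟩ := hcond
    have hmem' : r.2 ∈ report := List.contains_iff_mem.mp hmem
    refine ⟨r, hrr, hmem', ?_⟩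
    rw [show PySem.List.index? report r.2 = some (report.idxOf r.2) from ?_] at hdrop
    · exact List.contains_iff_mem.mp hdrop
    · rw [PySem.List.index?_eq_idxOf?]
      cases hi : List.idxOf? r.2 report with
      | none => exact absurd hmem' (by simpa using (List.idxOf?_eq_none_iff.mp hi))
      | some k =>
          have := List.idxOf_eq_getD_idxOf? r.2 report
          rw [hi] at this
          simp at this
          rw [this]
  · rintro ⟨r, hr, hmem, hdrop⟩
    refine ⟨r, (PySem.Set.mem_ofList rules r).mpr hr, ?_⟩
    rw [Bool.and_eq_true]
    refine ⟨List.contains_iff_mem.mpr hmem, ?_⟩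
    rw [show PySem.List.index? report r.2 = some (report.idxOf r.2) from ?_]
    · exact List.contains_iff_mem.mpr hdrop
    · rw [PySem.List.index?_eq_idxOf?]
      cases hi : List.idxOf? r.2 report with
      | none => exact absurd hmem (by simpa using (List.idxOf?_eq_none_iff.mp hi))
      | some k =>
          have := List.idxOf_eq_getD_idxOf? r.2 report
          rw [hi] at this
          simp at this
          rw [this]

theorem anyCheck_eq_violB (rules : List (Int × Int)) (report : List Int) :
    rules.any (checkRule report) = violB (PySem.Set.ofList rules) report := by
  by_cases h : Viol rules report
  · rw [(violB_iff rules report).mpr h, List.any_eq_true.mpr ?_]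
    obtain ⟨r, hr, hmem, hdrop⟩ := h
    exact ⟨r, hr, (checkRule_iff report r).mpr ⟨hmem, hdrop⟩⟩
  · rw [show violB (PySem.Set.ofList rules) report = false from ?_,
      show rules.any (checkRule report) = false from ?_]
    · rw [← Bool.not_eq_true, List.any_eq_true]
      rintro ⟨r, hr, hc⟩
      obtain ⟨hmem, hdrop⟩ := (checkRule_iff report r).mp hc
      exact h ⟨r, hr, hmem, hdrop⟩
    · rw [← Bool.not_eq_true]
      intro hc
      exact h ((violB_iff rules report).mp hc)

-- ===== VERDICT (by name: the statement is the Claim_ definition above) =====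
theorem d5p2_spec : Claim_equal_d5p2 := by
  intro rules reports hdom hpre
  unfold Spec_d5p2 d5p2 d5p2_alt
  simp only []
  rw [PySem.List.foldl_congr_mem reports _
      (fun (acc : List (List Int)) report =>
        if violB (PySem.Set.ofList rules) report then
          acc ++ [reorderReport rules (report.length * report.length + 1) report]
        else acc) []
      (by
        intro acc report hrep
        simp only []
        rw [PySem.List.foldl_if_false_eq, Bool.true_and, anyCheck_eq_violB]
        cases hv : violB (PySem.Set.ofList rules) report <;> simp [hv])]
  rw [PySem.List.foldl_append_if, List.nil_append]
  rw [PySem.List.foldl_if_eq_foldl_filter]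
  rw [PySem.List.foldl_add, PySem.List.foldl_add, List.map_map]
  congr 1
  congr 1
  apply List.map_congr_left
  intro report hrep
  have hb : violB (PySem.Set.ofList rules) report = true := (List.mem_filter.mp hrep).2
  have hv : Viol rules report := (violB_iff rules report).mp hb
  obtain ⟨hnd, hsto⟩ := hpre report (List.mem_filter.mp hrep).1 hv
  simp only [Function.comp_apply]
  rw [reorder_eq_sorted rules report hnd hsto]
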